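-- pv_equiv track=rewrite | github.com/Ravi-0412/DSA-Program-And-Notes | Dynamic Programming/Take and notTake DP/2901. Longest Unequal Adjacent Groups Subsequence II.py | getWordsInLongestSubsequence
-- ===== SOURCE A (Python) =====
-- from typing import List
--
-- def getWordsInLongestSubsequence(words: List[str], groups: List[int]) -> List[str]:
--     n = len(words)
--     dp = [[[] for _ in range(n + 1)] for _ in range(n + 1)]  # dp[cur][pre + 1] handles -1 index safely
--
--     def hammingDistance(a: str, b: str) -> int:
--         # Hamming distance: count differing characters at same positions
--         return sum(x != y for x, y in zip(a, b))
--
--     def solve(cur: int, pre: int) -> List[str]: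
--         if cur >= n:
--             return []
--
--         if dp[cur][pre + 1] != []:
--             return dp[cur][pre + 1]
--
--         notTake = solve(cur + 1, pre)
--
--         take = []
--         # Valid if first word (pre == -1) OR meets all 3 conditions:
--         # - different groups
--         # - same word length
--         # - hamming distance = 1
--         if pre == -1 or (
--             groups[cur] != groups[pre]
--             and len(words[cur]) == len(words[pre])
--             and hammingDistance(words[cur], words[pre]) == 1
--         ):
--             take = [words[cur]] + solve(cur + 1, cur)
--
--         dp[cur][pre + 1] = take if len(take) > len(notTake) else notTake
--         return dp[cur][pre + 1]
--
--     return solve(0, -1)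
-- ===== SOURCE B (Python) =====
-- def getWordsInLongestSubsequence(words, groups):
--     # DP on lengths with parent pointers, reconstruct the path once at the end.
--     n = len(words)
--
--     def compatible(j, k):
--         return (groups[j] != groups[k]
--                 and len(words[j]) == len(words[k])
--                 and sum(x != y for x, y in zip(words[j], words[k])) == 1)
--
--     L = [0] * n          # L[j] = length of best chain starting at j (taking j)
--     parent = [-1] * n    # parent[j] = next index of that chain, -1 if none
--     for j in range(n - 1, -1, -1):
--         best_len, best_k = 0, -1
--         for k in range(n - 1, j, -1):
--             if L[k] > best_len and compatible(j, k):
--                 best_len, best_k = L[k], k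
--         L[j] = 1 + best_len
--         parent[j] = best_k
--     start, best = -1, 0
--     for i in range(n - 1, -1, -1):
--         if L[i] > best:
--             best, start = L[i], i
--     out = []
--     while start != -1:
--         out.append(words[start])
--         start = parent[start]
--     return out
-- ===== Notes on version B (the rewrite author's own statement) =====
-- stated objective: faster
-- what changed: Replaces A's memoized take/notTake recursion, which builds and compares full candidate lists in every of its O(n^2) states, by a length-and-parent-pointer DP over suffixes that reconstructs the answer path once at the end.
import Mathlib
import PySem

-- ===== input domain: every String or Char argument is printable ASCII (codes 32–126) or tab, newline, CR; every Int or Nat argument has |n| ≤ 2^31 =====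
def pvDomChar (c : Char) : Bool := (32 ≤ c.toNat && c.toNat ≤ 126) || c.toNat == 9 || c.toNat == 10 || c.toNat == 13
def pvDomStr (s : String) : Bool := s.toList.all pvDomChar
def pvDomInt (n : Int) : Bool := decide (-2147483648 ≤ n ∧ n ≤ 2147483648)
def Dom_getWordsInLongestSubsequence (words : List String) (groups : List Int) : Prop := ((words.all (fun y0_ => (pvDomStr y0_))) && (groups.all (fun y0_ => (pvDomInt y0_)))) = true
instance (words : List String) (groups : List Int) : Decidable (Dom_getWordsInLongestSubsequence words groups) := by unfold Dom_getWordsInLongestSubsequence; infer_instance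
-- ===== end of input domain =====

-- B replaces A's memoized take/notTake recursion building list values in every state by a
-- length-and-parent-pointer DP with a single path reconstruction at the end (objective: faster).

-- ===== PORT A =====
-- sum(x != y for x, y in zip(a, b))
def pvHamA (a b : String) : Nat :=
  ((a.toList.zip b.toList).map (fun p => if p.1 ≠ p.2 then (1 : Nat) else 0)).sum

-- the take-condition: pre == -1 or (groups/length/hamming checks).  List indexing
-- groups[cur], words[pre], … is exact under Pre_ (all indices in range there); the
-- getD default is never read on admitted inputs.
def pvOkA (words : List String) (groups : List Int) (cur : Nat) (pre : Int) : Bool :=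
  pre == -1 ||
    (groups.getD cur 0 != groups.getD pre.toNat 0
      && ((words.getD cur "").toList.length == (words.getD pre.toNat "").toList.length)
      && pvHamA (words.getD cur "") (words.getD pre.toNat "") == 1)

-- solve(cur, pre) with the memo table dp[cur][pre+1] threaded through; fuel only
-- ensures termination (fuel > n - cur at every reachable call, so the 0 case is never hit).
def pvSolveA (W : List String) (G : List Int) (n : Nat) :
    Nat → Nat → Int → (Nat → Nat → List String) → List String × (Nat → Nat → List String)
  | 0, _, _, dp => ([], dp)
  | fuel + 1, cur, pre, dp =>
    if n ≤ cur then ([], dp)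
    else
      let key := (pre + 1).toNat
      if dp cur key ≠ [] then (dp cur key, dp)
      else
        let r1 := pvSolveA W G n fuel (cur + 1) pre dp
        let r2 :=
          if pvOkA W G cur pre then
            let r := pvSolveA W G n fuel (cur + 1) (Int.ofNat cur) r1.2
            (W.getD cur "" :: r.1, r.2)
          else ([], r1.2)
        let res := if r1.1.length < r2.1.length then r2.1 else r1.1
        (res, fun c k => if c = cur ∧ k = key then res else r2.2 c k)

def getWordsInLongestSubsequence (words : List String) (groups : List Int) : List String :=
  (pvSolveA words groups words.length (words.length + 1) 0 (-1) (fun _ _ => [])).1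

-- ===== PORT B =====
-- compatible(j, k): different groups, equal lengths, hamming distance 1
def pvCompatB (W : List String) (G : List Int) (j k : Nat) : Bool :=
  G.getD j 0 != G.getD k 0
    && ((W.getD j "").toList.length == (W.getD k "").toList.length)
    && (((W.getD j "").toList.zip (W.getD k "").toList).filter (fun p => p.1 ≠ p.2)).length == 1

-- Python range(a+m-1, a-1, -1): the indices [a, a+m) in descending order
def pvDesc (a m : Nat) : List Nat := (List.range' a m).reverse

-- the inner loop: best (length, index) over ks, condition L[k] > best_len and q(k)
def pvScan (L : Nat → Nat) (q : Nat → Bool) (ks : List Nat) : Nat × Int :=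
  ks.foldl (fun b k => if L k > b.1 && q k then (L k, (k : Int)) else b) (0, -1)

-- the outer loop over j = n-1 … 0 filling L[j] and parent[j]
def pvStepB (W : List String) (G : List Int) (n : Nat)
    (st : (Nat → Nat) × (Nat → Int)) (j : Nat) : (Nat → Nat) × (Nat → Int) :=
  let b := pvScan st.1 (pvCompatB W G j) (pvDesc (j + 1) (n - j - 1))
  (fun i => if i = j then 1 + b.1 else st.1 i, fun i => if i = j then b.2 else st.2 i)

def pvBuild (W : List String) (G : List Int) (n : Nat) : (Nat → Nat) × (Nat → Int) :=
  (pvDesc 0 n).foldl (pvStepB W G n) (fun _ => 0, fun _ => -1)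

-- while start != -1: append words[start]; start = parent[start].  The parent chain
-- strictly increases the index, so fuel n+1 is never exhausted.
def pvFollow (W : List String) (P : Nat → Int) : Nat → Int → List String
  | 0, _ => []
  | fuel + 1, i => if i == -1 then [] else W.getD i.toNat "" :: pvFollow W P fuel (P i.toNat)

def getWordsInLongestSubsequence_alt (words : List String) (groups : List Int) : List String :=
  let n := words.length
  let LP := pvBuild words groups n
  let s := (pvDesc 0 n).foldl (fun (b : Nat × Int) i => if LP.1 i > b.1 then (LP.1 i, (i : Int)) else b) (0, -1)
  pvFollow words LP.2 (n + 1) s.2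

-- ===== PRECONDITION & SPEC =====
-- Pre_ excludes exactly the inputs where Python A raises IndexError (two or more words but
-- fewer groups than words: groups[cur] is out of range); B raises there as well.
def Pre_getWordsInLongestSubsequence (words : List String) (groups : List Int) : Prop :=
  words.length ≤ groups.length ∨ words.length ≤ 1

instance (words : List String) (groups : List Int) : Decidable (Pre_getWordsInLongestSubsequence words groups) := by
  unfold Pre_getWordsInLongestSubsequence; infer_instance

def pvWitness_getWordsInLongestSubsequence : List String × List Int := (["ab", "ac"], [1, 2])

def Spec_getWordsInLongestSubsequence (words : List String) (groups : List Int) (out : List String) : Prop := out = getWordsInLongestSubsequence_alt words groups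
instance (words : List String) (groups : List Int) (out : List String) : Decidable (Spec_getWordsInLongestSubsequence words groups out) := by unfold Spec_getWordsInLongestSubsequence; infer_instance

-- ===== CLAIM (what is proved, stated in full; the proofs are below) =====
def Claim_equal_getWordsInLongestSubsequence : Prop := ∀ (words : List String) (groups : List Int), Dom_getWordsInLongestSubsequence words groups → Pre_getWordsInLongestSubsequence words groups → Spec_getWordsInLongestSubsequence words groups (getWordsInLongestSubsequence words groups)

-- ===== LEMMAS AND PROOFS =====

-- the memo-free recursion solve(cur, pre)
def pvS (W : List String) (G : List Int) (n : Nat) : Nat → Nat → Int → List String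
  | 0, _, _ => []
  | fuel + 1, cur, pre =>
    if n ≤ cur then []
    else
      let notTake := pvS W G n fuel (cur + 1) pre
      let take := if pvOkA W G cur pre then W.getD cur "" :: pvS W G n fuel (cur + 1) (Int.ofNat cur) else []
      if notTake.length < take.length then take else notTake

theorem pvS_irrel (W : List String) (G : List Int) (n : Nat) :
    ∀ f1 f2 cur pre, n - cur < f1 → n - cur < f2 →
      pvS W G n f1 cur pre = pvS W G n f2 cur pre := by
  intro f1
  induction f1 with
  | zero => intro f2 cur pre h1 _; omega
  | succ f1 ih =>
    intro f2 cur pre h1 h2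
    cases f2 with
    | zero => omega
    | succ f2 =>
      simp only [pvS]
      by_cases hc : n ≤ cur
      · simp [hc]
      · simp only [hc, if_false]
        rw [ih f2 (cur + 1) pre (by omega) (by omega),
            ih f2 (cur + 1) (Int.ofNat cur) (by omega) (by omega)]

def pvSc (W : List String) (G : List Int) (n : Nat) (cur : Nat) (pre : Int) : List String :=
  pvS W G n (n + 1 - cur) cur pre

theorem pvSc_stop (W : List String) (G : List Int) (n cur : Nat) (pre : Int) (h : n ≤ cur) :
    pvSc W G n cur pre = [] := by
  unfold pvSc
  cases hf : n + 1 - cur with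
  | zero => simp [pvS]
  | succ f => simp [pvS, h]

theorem pvSc_step (W : List String) (G : List Int) (n cur : Nat) (pre : Int) (h : cur < n) :
    pvSc W G n cur pre =
      (let notTake := pvSc W G n (cur + 1) pre
       let take := if pvOkA W G cur pre then W.getD cur "" :: pvSc W G n (cur + 1) (Int.ofNat cur) else []
       if notTake.length < take.length then take else notTake) := by
  unfold pvSc
  have hf : n + 1 - cur = (n - cur) + 1 := by omega
  rw [hf]
  simp only [pvS, Nat.not_le.mpr h, if_false]
  rw [pvS_irrel W G n (n - cur) (n + 1 - (cur + 1)) (cur + 1) pre (by omega) (by omega),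
      pvS_irrel W G n (n - cur) (n + 1 - (cur + 1)) (cur + 1) (Int.ofNat cur) (by omega) (by omega)]

-- the memo-table invariant
def pvInvA (W : List String) (G : List Int) (n : Nat) (dp : Nat → Nat → List String) : Prop :=
  ∀ c k, dp c k = [] ∨ dp c k = pvSc W G n c ((k : Int) - 1)

theorem pvSolveA_correct (W : List String) (G : List Int) (n : Nat) :
    ∀ fuel cur pre dp, n - cur < fuel → -1 ≤ pre → pvInvA W G n dp →
      (pvSolveA W G n fuel cur pre dp).1 = pvSc W G n cur pre ∧
      pvInvA W G n (pvSolveA W G n fuel cur pre dp).2 := by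
  intro fuel
  induction fuel with
  | zero => intro cur pre dp h _ _; omega
  | succ fuel ih =>
    intro cur pre dp hfuel hpre hinv
    by_cases hc : n ≤ cur
    · refine ⟨?_, ?_⟩
      · simp [pvSolveA, hc, pvSc_stop W G n cur pre hc]
      · simpa [pvSolveA, hc] using hinv
    · have hcur : cur < n := Nat.not_le.mp hc
      have hkey : ((((pre + 1).toNat : Nat) : Int) - 1) = pre := by
        have h0 : (0 : Int) ≤ pre + 1 := by omega
        rw [Int.toNat_of_nonneg h0]; ring
      simp only [pvSolveA, hc, if_false]
      by_cases hdp : dp cur (pre + 1).toNat ≠ []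
      · rw [if_pos hdp]
        rcases hinv cur (pre + 1).toNat with h0 | h0
        · exact absurd h0 hdp
        · exact ⟨by rw [h0, hkey], hinv⟩
      · rw [if_neg hdp]
        obtain ⟨e1, i1⟩ := ih (cur + 1) pre dp (by omega) hpre hinv
        by_cases hok : pvOkA W G cur pre = true
        · rw [if_pos hok]
          obtain ⟨e2, i2⟩ := ih (cur + 1) (Int.ofNat cur) (pvSolveA W G n fuel (cur + 1) pre dp).2
            (by omega) (by simp only [Int.ofNat_eq_natCast]; omega) i1
          dsimp only
          have hres : (if (pvSolveA W G n fuel (cur + 1) pre dp).1.length <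
                (W.getD cur "" :: (pvSolveA W G n fuel (cur + 1) (Int.ofNat cur)
                    (pvSolveA W G n fuel (cur + 1) pre dp).2).1).length then
              W.getD cur "" :: (pvSolveA W G n fuel (cur + 1) (Int.ofNat cur)
                  (pvSolveA W G n fuel (cur + 1) pre dp).2).1
            else (pvSolveA W G n fuel (cur + 1) pre dp).1) = pvSc W G n cur pre := by
            rw [e1, e2, pvSc_step W G n cur pre hcur]
            simp only [hok, if_true]
          refine ⟨hres, ?_⟩
          intro c k
          dsimp only
          by_cases hck : c = cur ∧ k = (pre + 1).toNat
          · rw [if_pos hck, hck.1, hck.2, hkey]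
            exact Or.inr hres
          · rw [if_neg hck]
            exact i2 c k
        · rw [if_neg hok]
          dsimp only
          have hres : (if (pvSolveA W G n fuel (cur + 1) pre dp).1.length < ([] : List String).length
                then ([] : List String) else (pvSolveA W G n fuel (cur + 1) pre dp).1) = pvSc W G n cur pre := by
            rw [e1, pvSc_step W G n cur pre hcur]
            simp only [hok]
            simp
          refine ⟨hres, ?_⟩
          intro c k
          dsimp only
          by_cases hck : c = cur ∧ k = (pre + 1).toNat
          · rw [if_pos hck, hck.1, hck.2, hkey]
            exact Or.inr hres
          · rw [if_neg hck]
            exact i1 c k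

theorem portA_eq (words : List String) (groups : List Int) :
    getWordsInLongestSubsequence words groups = pvSc words groups words.length 0 (-1) := by
  have h := pvSolveA_correct words groups words.length (words.length + 1) 0 (-1)
      (fun _ _ => []) (by omega) (by omega) (fun c k => Or.inl rfl)
  exact h.1

-- the chain starting at index j (taking j)
def pvChain (W : List String) (G : List Int) (n j : Nat) : List String :=
  W.getD j "" :: pvSc W G n (j + 1) (Int.ofNat j)

theorem pvMemDesc (a m k : Nat) : k ∈ pvDesc a m ↔ a ≤ k ∧ k < a + m := by
  simp only [pvDesc, List.mem_reverse, List.mem_range'_1]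

theorem pvDesc_peel (a m : Nat) : pvDesc a (m + 1) = (a + m) :: pvDesc a m := by
  unfold pvDesc
  rw [List.range'_concat, List.reverse_append]
  simp

theorem pvDesc_snoc (a m : Nat) : pvDesc a (m + 1) = pvDesc (a + 1) m ++ [a] := by
  unfold pvDesc
  rw [List.range'_succ, List.reverse_cons]

theorem pvScan_congr (L L' : Nat → Nat) (q : Nat → Bool) (ks : List Nat)
    (h : ∀ k ∈ ks, L k = L' k) : pvScan L q ks = pvScan L' q ks := by
  unfold pvScan
  have aux : ∀ (ks : List Nat) (b : Nat × Int), (∀ k ∈ ks, L k = L' k) →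
      ks.foldl (fun b k => if L k > b.1 && q k then (L k, (k : Int)) else b) b =
      ks.foldl (fun b k => if L' k > b.1 && q k then (L' k, (k : Int)) else b) b := by
    intro ks
    induction ks with
    | nil => intro b _; rfl
    | cons x xs ih =>
      intro b h
      simp only [List.foldl_cons]
      rw [h x (by simp), ih _ (fun k hk => h k (by simp [hk]))]
  exact aux ks (0, -1) h


-- the outer loop computes a fixpoint: each L[j]/parent[j] is the scan over (j, n) of the final arrays
theorem pvBuild_fix (W : List String) (G : List Int) (n : Nat) :
    ∀ m st0,
      (∀ i, m ≤ i → ((pvDesc 0 m).foldl (pvStepB W G n) st0).1 i = st0.1 i ∧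
                     ((pvDesc 0 m).foldl (pvStepB W G n) st0).2 i = st0.2 i) ∧
      (∀ j, j < m →
        ((pvDesc 0 m).foldl (pvStepB W G n) st0).1 j =
          1 + (pvScan ((pvDesc 0 m).foldl (pvStepB W G n) st0).1 (pvCompatB W G j) (pvDesc (j + 1) (n - j - 1))).1 ∧
        ((pvDesc 0 m).foldl (pvStepB W G n) st0).2 j =
          (pvScan ((pvDesc 0 m).foldl (pvStepB W G n) st0).1 (pvCompatB W G j) (pvDesc (j + 1) (n - j - 1))).2) := by
  intro m
  induction m with
  | zero =>
    intro st0
    refine ⟨fun i _ => ⟨rfl, rfl⟩, fun j hj => absurd hj (Nat.not_lt_zero j)⟩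
  | succ m ih =>
    intro st0
    have hpeel : pvDesc 0 (m + 1) = m :: pvDesc 0 m := by
      have := pvDesc_peel 0 m; simpa using this
    rw [hpeel]
    simp only [List.foldl_cons]
    set st1 := pvStepB W G n st0 m with hst1
    obtain ⟨ihU, ihF⟩ := ih st1
    set F := (pvDesc 0 m).foldl (pvStepB W G n) st1 with hF
    have hst1i : ∀ i, i ≠ m → st1.1 i = st0.1 i ∧ st1.2 i = st0.2 i := by
      intro i hi
      constructor <;> simp [hst1, pvStepB, hi]
    have hFhigh : ∀ i, m ≤ i → i ≠ m → F.1 i = st0.1 i ∧ F.2 i = st0.2 i := by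
      intro i h1 h2
      obtain ⟨u1, u2⟩ := ihU i h1
      obtain ⟨v1, v2⟩ := hst1i i h2
      exact ⟨u1.trans v1, u2.trans v2⟩
    constructor
    · intro i hi
      exact hFhigh i (by omega) (by omega)
    · intro j hj
      by_cases hjm : j < m
      · exact ihF j hjm
      · have hjeq : j = m := by omega
        subst hjeq
        have hscan : pvScan F.1 (pvCompatB W G j) (pvDesc (j + 1) (n - j - 1)) =
            pvScan st0.1 (pvCompatB W G j) (pvDesc (j + 1) (n - j - 1)) := by
          apply pvScan_congr
          intro k hk
          have hk' := (pvMemDesc (j + 1) (n - j - 1) k).mp hk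
          exact (hFhigh k (by omega) (by omega)).1
        have hFm1 : F.1 j = st1.1 j := (ihU j (le_refl j)).1
        have hFm2 : F.2 j = st1.2 j := (ihU j (le_refl j)).2
        rw [hscan, hFm1, hFm2]
        constructor <;> simp [hst1, pvStepB]

-- pvOkA k pre, read as a predicate of k, is B's compatible(pre, k) (for pre = j ≥ 0) resp. true (pre = -1)
theorem pvHam_sym (l1 l2 : List Char) :
    ((l1.zip l2).filter (fun p => p.1 ≠ p.2)).length = ((l2.zip l1).filter (fun p => p.1 ≠ p.2)).length := by
  induction l1 generalizing l2 with
  | nil => cases l2 <;> simp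
  | cons x xs ih =>
    cases l2 with
    | nil => simp
    | cons y ys =>
      simp only [List.zip_cons_cons, List.filter_cons]
      by_cases h : x = y
      · subst h
        simp only [ne_eq, decide_not] at ih ⊢
        simp [ih ys]
      · simp only [ne_eq, decide_not] at ih ⊢
        simp [h, Ne.symm h, ih ys]

theorem pvHamA_eq (a b : String) :
    pvHamA a b = ((a.toList.zip b.toList).filter (fun p => p.1 ≠ p.2)).length := by
  unfold pvHamA
  generalize (a.toList.zip b.toList) = l
  induction l with
  | nil => rfl
  | cons x xs ih =>
    simp only [List.map_cons, List.sum_cons, List.filter_cons, ih]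
    simp only [ne_eq, decide_not] at ih ⊢
    by_cases h : x.1 = x.2
    · simp [h]
    · simp [h]
      omega

theorem pvOk_compat (W : List String) (G : List Int) (j : Nat) :
    ∀ k, pvOkA W G k (Int.ofNat j) = pvCompatB W G j k := by
  intro k
  unfold pvOkA pvCompatB
  have h1 : (Int.ofNat j == -1) = false := by
    simp
  rw [h1, pvHamA_eq]
  simp only [Int.ofNat_eq_natCast, Int.toNat_natCast, Bool.false_or]
  rw [pvHam_sym]
  congr 1
  congr 1
  · exact bne_comm
  · exact Bool.beq_comm

theorem pvOk_neg (W : List String) (G : List Int) :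
    ∀ k, pvOkA W G k (-1) = true := by
  intro k; simp [pvOkA]

-- the main bridge: the scan over [cur, n) of the final L array selects exactly solve(cur, pre)
theorem pvLf_fix (W : List String) (G : List Int) (n j : Nat) (hj : j < n) :
    (pvBuild W G n).1 j =
      1 + (pvScan (pvBuild W G n).1 (pvCompatB W G j) (pvDesc (j + 1) (n - j - 1))).1 ∧
    (pvBuild W G n).2 j =
      (pvScan (pvBuild W G n).1 (pvCompatB W G j) (pvDesc (j + 1) (n - j - 1))).2 := by
  unfold pvBuild
  exact (pvBuild_fix W G n n (fun _ => 0, fun _ => -1)).2 j hj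

theorem pvMain (W : List String) (G : List Int) (n : Nat) (hn : n = W.length) :
    ∀ m cur pre q, cur + m = n → (∀ k, q k = pvOkA W G k pre) →
      ((pvScan (pvBuild W G n).1 q (pvDesc cur m)).2 = -1 ∧ pvSc W G n cur pre = [] ∨
        ∃ j : Nat, (pvScan (pvBuild W G n).1 q (pvDesc cur m)).2 = (j : Int) ∧ cur ≤ j ∧ j < n ∧
          pvSc W G n cur pre = pvChain W G n j) ∧
      (pvScan (pvBuild W G n).1 q (pvDesc cur m)).1 = (pvSc W G n cur pre).length := by
  intro m
  induction m with
  | zero =>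
    intro cur pre q hm hq
    have hstop := pvSc_stop W G n cur pre (by omega)
    simp [pvDesc, pvScan, hstop]
  | succ m ih =>
    intro cur pre q hm hq
    have hcur : cur < n := by omega
    have hsnoc := pvDesc_snoc cur m
    have hstep : pvScan (pvBuild W G n).1 q (pvDesc cur (m + 1)) =
        (let b := pvScan (pvBuild W G n).1 q (pvDesc (cur + 1) m)
         if (pvBuild W G n).1 cur > b.1 && q cur then ((pvBuild W G n).1 cur, (cur : Int)) else b) := by
      rw [hsnoc]
      unfold pvScan
      rw [List.foldl_append]
      rfl
    obtain ⟨ihD, ihL⟩ := ih (cur + 1) pre q (by omega) hq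
    have ihC := (ih (cur + 1) (Int.ofNat cur) (pvCompatB W G cur) (by omega)
      (fun k => (pvOk_compat W G cur k).symm)).2
    have hfix := (pvLf_fix W G n cur hcur).1
    have hmeq : n - cur - 1 = m := by omega
    rw [hmeq] at hfix
    have hLcur : (pvBuild W G n).1 cur = (pvChain W G n cur).length := by
      rw [hfix, ihC]
      simp only [pvChain, List.length_cons]
      omega
    have hSstep := pvSc_step W G n cur pre hcur
    rw [hstep]
    by_cases hok : pvOkA W G cur pre = true
    · by_cases hgt : (pvScan (pvBuild W G n).1 q (pvDesc (cur + 1) m)).1 < (pvBuild W G n).1 cur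
      · have hcond : ((pvBuild W G n).1 cur > (pvScan (pvBuild W G n).1 q (pvDesc (cur + 1) m)).1
            && q cur) = true := by
          rw [hq cur, hok, Bool.and_true]
          exact decide_eq_true hgt
        simp only [hcond, if_true]
        have htake : pvSc W G n cur pre = pvChain W G n cur := by
          rw [hSstep]
          simp only [hok, if_true]
          rw [if_pos]
          · rfl
          · rw [← ihL]
            calc (pvScan (pvBuild W G n).1 q (pvDesc (cur + 1) m)).1
                < (pvBuild W G n).1 cur := hgt
              _ = (pvChain W G n cur).length := hLcur
        refine ⟨Or.inr ⟨cur, rfl, le_refl cur, hcur, htake⟩, ?_⟩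
        rw [htake, hLcur]
      · have hcond : ((pvBuild W G n).1 cur > (pvScan (pvBuild W G n).1 q (pvDesc (cur + 1) m)).1
            && q cur) = false := by
          rw [Bool.and_eq_false_iff]
          left
          exact decide_eq_false (by omega)
        simp only [hcond]
        have hlen : (W.getD cur "" :: pvSc W G n (cur + 1) (Int.ofNat cur)).length ≤
            (pvSc W G n (cur + 1) pre).length := by
          have h1 : (W.getD cur "" :: pvSc W G n (cur + 1) (Int.ofNat cur)).length =
              (pvChain W G n cur).length := rfl
          rw [h1, ← hLcur, ← ihL]
          omega
        have hnot : pvSc W G n cur pre = pvSc W G n (cur + 1) pre := by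
          rw [hSstep]
          simp only [hok, if_true]
          rw [if_neg (not_lt.mpr hlen)]
        rw [hnot]
        refine ⟨?_, ihL⟩
        rcases ihD with h | ⟨j, h1, h2, h3, h4⟩
        · exact Or.inl h
        · exact Or.inr ⟨j, h1, by omega, h3, h4⟩
    · have hq0 : q cur = false := by rw [hq cur]; exact Bool.not_eq_true _ ▸ (by simpa using hok)
      have hcond : ((pvBuild W G n).1 cur > (pvScan (pvBuild W G n).1 q (pvDesc (cur + 1) m)).1
          && q cur) = false := by rw [hq0, Bool.and_false]
      simp only [hcond]
      have hnot : pvSc W G n cur pre = pvSc W G n (cur + 1) pre := by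
        rw [hSstep]
        simp only [hok]
        simp
      rw [hnot]
      refine ⟨?_, ihL⟩
      rcases ihD with h | ⟨j, h1, h2, h3, h4⟩
      · exact Or.inl h
      · exact Or.inr ⟨j, h1, by omega, h3, h4⟩

theorem pvFollow_neg (W : List String) (P : Nat → Int) : ∀ f, pvFollow W P f (-1) = [] := by
  intro f; cases f <;> simp [pvFollow]

theorem pvFollow_chain (W : List String) (G : List Int) (n : Nat) (hn : n = W.length) :
    ∀ fuel j, j < n → n - j < fuel →
      pvFollow W (pvBuild W G n).2 fuel (Int.ofNat j) = pvChain W G n j := by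
  intro fuel
  induction fuel with
  | zero => intro j hj hf; omega
  | succ fuel ih =>
    intro j hj hf
    have hne : (((j : Nat) : Int) == -1) = false := by simp
    simp only [pvFollow, Int.ofNat_eq_natCast, hne, Bool.false_eq_true, if_false, Int.toNat_natCast]
    have hP := (pvLf_fix W G n j hj).2
    have hm : (j + 1) + (n - j - 1) = n := by omega
    obtain ⟨hD, _⟩ := pvMain W G n hn (n - j - 1) (j + 1) (Int.ofNat j) (pvCompatB W G j) hm
      (fun k => (pvOk_compat W G j k).symm)
    rcases hD with ⟨h1, h2⟩ | ⟨j', h1, h2, h3, h4⟩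
    · rw [hP, h1, pvFollow_neg]
      simp only [pvChain, h2]
    · rw [hP, h1]
      have : pvFollow W (pvBuild W G n).2 fuel (Int.ofNat j') = pvChain W G n j' :=
        ih j' h3 (by omega)
      simp only [Int.ofNat_eq_natCast] at this
      rw [this]
      simp only [pvChain, h4]

theorem pvSpec (words : List String) (groups : List Int) :
    getWordsInLongestSubsequence words groups = getWordsInLongestSubsequence_alt words groups := by
  rw [portA_eq]
  unfold getWordsInLongestSubsequence_alt
  have hfold : (pvDesc 0 words.length).foldl
      (fun (b : Nat × Int) i => if (pvBuild words groups words.length).1 i > b.1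
        then ((pvBuild words groups words.length).1 i, (i : Int)) else b) (0, -1) =
      pvScan (pvBuild words groups words.length).1 (fun _ => true) (pvDesc 0 words.length) := by
    unfold pvScan
    congr 1
    funext b k
    simp
  simp only []
  rw [hfold]
  obtain ⟨hD, _⟩ := pvMain words groups words.length rfl words.length 0 (-1) (fun _ => true)
    (by omega) (fun k => (pvOk_neg words groups k).symm)
  rcases hD with ⟨h1, h2⟩ | ⟨j, h1, _, h3, h4⟩
  · rw [h1, pvFollow_neg, h2]
  · rw [h1, h4]
    have := pvFollow_chain words groups words.length rfl (words.length + 1) j h3 (by omega)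
    simp only [Int.ofNat_eq_natCast] at this
    rw [this]

-- ===== VERDICT (by name: the statement is the Claim_ definition above) =====
theorem getWordsInLongestSubsequence_spec : Claim_equal_getWordsInLongestSubsequence := by
  intro words groups _ _
  unfold Spec_getWordsInLongestSubsequence
  exact pvSpec words groups
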